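-- pv_equiv track=rewrite | github.com/MauriceHendrix/reading-group-software-topics | timing.py | square_of_negative_in_list2
-- ===== SOURCE A (Python) =====
-- def square_of_negative_in_list2(lst):
--     found_squares = set()
--     for v in lst:
--         if v > 0:
--             found_squares.add(v)
--     for v in lst:
--         if v < 0 and not v**2 in found_squares:
--             return False
--     return True
-- ===== SOURCE B (Python) =====
-- def square_of_negative_in_list2(lst):
--     s = sorted(lst)
--     n = len(s)
--     for v in s:
--         if v >= 0:
--             break
--         x = v * v
--         lo, hi = 0, n
--         while lo < hi:
--             mid = (lo + hi) // 2
--             if s[mid] < x: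
--                 lo = mid + 1
--             else:
--                 hi = mid
--         if lo == n or s[lo] != x:
--             return False
--     return True
-- ===== Notes on version B (the rewrite author's own statement) =====
-- stated objective: alternative
-- what changed: B drops the hash set entirely: it sorts the list once, scans the sorted copy breaking at the first non-negative element, and checks each negative's square by a hand-written binary search on the sorted list.
import Mathlib
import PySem

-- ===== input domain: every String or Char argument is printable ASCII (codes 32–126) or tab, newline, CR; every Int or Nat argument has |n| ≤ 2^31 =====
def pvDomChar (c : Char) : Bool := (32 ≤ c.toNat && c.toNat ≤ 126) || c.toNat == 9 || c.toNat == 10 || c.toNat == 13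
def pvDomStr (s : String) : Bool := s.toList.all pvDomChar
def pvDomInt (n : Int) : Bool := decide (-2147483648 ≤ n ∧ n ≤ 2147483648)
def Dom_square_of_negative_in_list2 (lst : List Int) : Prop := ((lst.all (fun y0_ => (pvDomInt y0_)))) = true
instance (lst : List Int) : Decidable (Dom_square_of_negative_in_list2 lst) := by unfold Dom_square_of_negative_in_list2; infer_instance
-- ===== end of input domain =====

-- B drops A's hash set: it sorts once, scans the sorted copy breaking at the first
-- non-negative element, and locates each negative's square by binary search (objective: alternative).

-- ===== PORT A =====
-- second loop of A: early `return False` ↦ structural recursion returning false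
def pvLoopA (found_squares : PySem.Set Int) : List Int → Bool
  | [] => true
  | v :: rest =>
      if v < 0 && !(PySem.Set.contains found_squares (v ^ 2)) then false
      else pvLoopA found_squares rest

def square_of_negative_in_list2 (lst : List Int) : Bool :=
  let found_squares : PySem.Set Int :=
    lst.foldl (fun s v => if v > 0 then PySem.Set.add s v else s) PySem.Set.empty
  pvLoopA found_squares lst

-- ===== PORT B =====
-- the `while lo < hi` binary-search loop of Source B; (lo+hi)//2 on nonnegative ints is Nat
-- division, and s[mid] is in range (lo ≤ mid < hi ≤ len s), so `getD … 0` is exact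
def pvBisect (s : List Int) (x : Int) (lo hi : Nat) : Nat :=
  if h : lo < hi then
    let mid := (lo + hi) / 2
    if s.getD mid 0 < x then pvBisect s x (mid + 1) hi
    else pvBisect s x lo mid
  else lo
termination_by hi - lo
decreasing_by all_goals omega

-- outer `for v in s` loop of Source B: `break` on v ≥ 0 returns true, failed search returns false
def pvLoopB (s : List Int) : List Int → Bool
  | [] => true
  | v :: rest =>
      if v ≥ 0 then true
      else
        let x := v * v
        let lo := pvBisect s x 0 s.length
        if lo == s.length || !(s.getD lo 0 == x) then false
        else pvLoopB s rest

def square_of_negative_in_list2_alt (lst : List Int) : Bool :=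
  let s := PySem.List.sorted lst (fun x => x) false
  pvLoopB s s

-- ===== PRECONDITION & SPEC =====
def Spec_square_of_negative_in_list2 (lst : List Int) (out : Bool) : Prop := out = square_of_negative_in_list2_alt lst
instance (lst : List Int) (out : Bool) : Decidable (Spec_square_of_negative_in_list2 lst out) := by unfold Spec_square_of_negative_in_list2; infer_instance

-- ===== CLAIM (what is proved, stated in full; the proofs are below) =====
def Claim_equal_square_of_negative_in_list2 : Prop := ∀ (lst : List Int), Dom_square_of_negative_in_list2 lst → Spec_square_of_negative_in_list2 lst (square_of_negative_in_list2 lst)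

-- ===== LEMMAS AND PROOFS =====

-- A's first loop builds exactly the set of positive elements of lst
theorem pvFoldA_eq_ofList_filter (lst : List Int) (s : PySem.Set Int) :
    lst.foldl (fun s v => if v > 0 then PySem.Set.add s v else s) s
      = (lst.filter (fun v => v > 0)).foldl PySem.Set.add s := by
  induction lst generalizing s with
  | nil => rfl
  | cons v rest ih =>
      by_cases h : v > 0 <;> simp [List.foldl_cons, h, ih]

theorem pvLoopA_iff (fs : PySem.Set Int) (lst : List Int) :
    pvLoopA fs lst = true ↔ ∀ v ∈ lst, v < 0 → (v ^ 2) ∈ fs := by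
  induction lst with
  | nil => simp [pvLoopA]
  | cons v rest ih =>
      by_cases h : v < 0 ∧ ¬ ((v ^ 2) ∈ fs)
      · simp only [pvLoopA, PySem.Set.contains]
        rw [if_pos (by simpa [h.1] using h.2)]
        exact iff_of_false (by simp) (fun hall => h.2 (hall v (by simp) h.1))
      · rcases Decidable.not_and_iff_not_or_not.mp h with h1 | h2
        · simp [pvLoopA, PySem.Set.contains, h1, ih]
        · have hmem : (v ^ 2) ∈ fs := Decidable.not_not.mp h2
          simp [pvLoopA, PySem.Set.contains, hmem, ih]

-- binary-search invariant: the result r keeps s[j] < x for j < r and x ≤ s[j] for r ≤ j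
theorem pvBisect_spec (s : List Int) (x : Int)
    (hs : s.Pairwise (· ≤ ·)) (lo hi : Nat) (hlo : lo ≤ hi) (hhi : hi ≤ s.length)
    (hbelow : ∀ j, j < lo → ∀ (hj : j < s.length), s[j] < x)
    (habove : ∀ j, hi ≤ j → ∀ (hj : j < s.length), x ≤ s[j]) :
    pvBisect s x lo hi ≤ s.length ∧
      (∀ j, j < pvBisect s x lo hi → ∀ (hj : j < s.length), s[j] < x) ∧
      (∀ j, pvBisect s x lo hi ≤ j → ∀ (hj : j < s.length), x ≤ s[j]) := by
  by_cases h : lo < hi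
  · have hmid : (lo + hi) / 2 < s.length := by omega
    rw [pvBisect, dif_pos h]
    simp only [List.getD_eq_getElem s 0 hmid]
    by_cases hc : s[(lo + hi) / 2] < x
    · rw [if_pos hc]
      refine pvBisect_spec s x hs ((lo + hi) / 2 + 1) hi (by omega) hhi
        (fun j hj hjl => ?_) habove
      have hmono : s[j] ≤ s[(lo + hi) / 2] := by
        rcases Nat.lt_or_ge j ((lo + hi) / 2) with hlt | hge
        · exact List.pairwise_iff_getElem.mp hs j _ hjl hmid hlt
        · have : j = (lo + hi) / 2 := by omega
          subst this; exact le_refl _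
      exact lt_of_le_of_lt hmono hc
    · rw [if_neg hc]
      refine pvBisect_spec s x hs lo ((lo + hi) / 2) (by omega) (by omega)
        hbelow (fun j hj hjl => ?_)
      have hmono : s[(lo + hi) / 2] ≤ s[j] := by
        rcases Nat.lt_or_ge ((lo + hi) / 2) j with hlt | hge
        · exact List.pairwise_iff_getElem.mp hs _ j hmid hjl hlt
        · have : j = (lo + hi) / 2 := by omega
          subst this; exact le_refl _
      exact le_trans (le_of_not_gt hc) hmono
  · rw [pvBisect, dif_neg h]
    have : lo = hi ∨ hi < lo := by omega
    exact ⟨by omega, hbelow, fun j hj hjl => habove j (by omega) hjl⟩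
termination_by hi - lo
decreasing_by all_goals omega

-- the membership test Source B performs after the search decides x ∈ s, for sorted s
theorem pvBisect_mem (s : List Int) (x : Int) (hs : s.Pairwise (· ≤ ·)) :
    (¬ (pvBisect s x 0 s.length = s.length ∨ ¬ s.getD (pvBisect s x 0 s.length) 0 = x))
      ↔ x ∈ s := by
  obtain ⟨h1, h2, h3⟩ := pvBisect_spec s x hs 0 s.length (by omega) (le_refl _)
    (by omega) (fun j hj hjl => by omega)
  set r := pvBisect s x 0 s.length with hr
  constructor
  · intro h
    push Not at h
    have hrl : r < s.length := by omega
    rw [List.getD_eq_getElem s 0 hrl] at h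
    exact h.2 ▸ List.getElem_mem hrl
  · intro hmem
    obtain ⟨j, hj, hval⟩ := List.mem_iff_getElem.mp hmem
    have hjr : ¬ j < r := fun hlt => absurd hval (by
      have := h2 j hlt hj; omega)
    have hrl : r < s.length := by omega
    push Not
    refine ⟨by omega, ?_⟩
    rw [List.getD_eq_getElem s 0 hrl]
    have hle : x ≤ s[r] := h3 r (le_refl _) hrl
    have : s[r] ≤ s[j] := by
      rcases Nat.lt_or_ge r j with hlt | hge
      · exact List.pairwise_iff_getElem.mp hs r j hrl hj hlt
      · have : r = j := by omega
        subst this; exact le_refl _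
    omega
  -- LoopB over a sorted suffix: true iff every negative's square is in s
theorem pvLoopB_iff (s : List Int) (hs : s.Pairwise (· ≤ ·)) (l : List Int)
    (hl : l.Pairwise (· ≤ ·)) :
    pvLoopB s l = true ↔ ∀ v ∈ l, v < 0 → (v * v) ∈ s := by
  induction l with
  | nil => simp [pvLoopB]
  | cons v rest ih =>
      rw [List.pairwise_cons] at hl
      by_cases hv : v ≥ 0
      · -- break: all later elements are ≥ v ≥ 0, so no negatives remain
        simp only [pvLoopB, if_pos hv]
        constructor
        · intro _ w hw hwneg
          rcases List.mem_cons.mp hw with rfl | hw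
          · omega
          · have := hl.1 w hw; omega
        · intro _; trivial
      · simp only [pvLoopB, if_neg hv]
        have hmem := pvBisect_mem s (v * v) hs
        by_cases hfound : (v * v) ∈ s
        · have : ¬ (pvBisect s (v*v) 0 s.length = s.length ∨
              ¬ s.getD (pvBisect s (v*v) 0 s.length) 0 = v * v) := hmem.mpr hfound
          push Not at this
          have h2 := this.2
          simp only [List.getD] at h2
          rw [if_neg (by simp [this.1, h2])]
          rw [ih hl.2]
          constructor
          · intro h w hw hwneg
            rcases List.mem_cons.mp hw with rfl | hw
            · exact hfound
            · exact h w hw hwneg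
          · intro h w hw hwneg
            exact h w (List.mem_cons_of_mem _ hw) hwneg
        · have hcond : (pvBisect s (v*v) 0 s.length = s.length ∨
              ¬ s.getD (pvBisect s (v*v) 0 s.length) 0 = v * v) := by
            by_contra hc; exact hfound (hmem.mp hc)
          have hbool : (pvBisect s (v*v) 0 s.length == s.length
              || !(s.getD (pvBisect s (v*v) 0 s.length) 0 == v * v)) = true := by
            rcases hcond with h | h
            · simp [h]
            · simp only [List.getD] at h; simp [h]
          rw [if_pos hbool]
          exact iff_of_false (by simp)
            (fun hall => hfound (hall v (List.mem_cons_self) (by omega)))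
  -- ===== VERDICT (by name: the statement is the Claim_ definition above) =====
theorem square_of_negative_in_list2_spec : Claim_equal_square_of_negative_in_list2 := by
  intro lst _
  unfold Spec_square_of_negative_in_list2
  unfold square_of_negative_in_list2 square_of_negative_in_list2_alt
  rw [Bool.eq_iff_iff, pvFoldA_eq_ofList_filter]
  rw [show ((lst.filter (fun v => v > 0)).foldl PySem.Set.add PySem.Set.empty)
        = PySem.Set.ofList (lst.filter (fun v => v > 0)) from rfl]
  have hs : (PySem.List.sorted lst (fun x => x) false).Pairwise (· ≤ ·) := by
    simpa using PySem.List.sorted_pairwise lst (fun x => x)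
  rw [pvLoopA_iff, pvLoopB_iff _ hs _ hs]
  constructor
  · intro h v hv hvneg
    rw [PySem.List.mem_sorted] at hv ⊢
    have := h v hv hvneg
    rw [PySem.Set.mem_ofList] at this
    have := List.mem_filter.mp this
    simpa [pow_two, mul_self_nonneg] using this.1
  · intro h v hv hvneg
    rw [PySem.Set.mem_ofList]
    refine List.mem_filter.mpr ⟨?_, by
      simp only [gt_iff_lt, decide_eq_true_eq, pow_two]
      exact mul_pos_of_neg_of_neg hvneg hvneg⟩
    have := h v (by rw [PySem.List.mem_sorted]; exact hv) hvneg
    rw [PySem.List.mem_sorted] at this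
    simpa [pow_two] using this
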